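-- pv_equiv track=rewrite | github.com/nmeusling/advent-of-code-2023 | day1.py | replace_first_and_last_written_numbers
-- ===== SOURCE A (Python) =====
-- def replace_first_and_last_written_numbers(text: str):
--     digit_replacements = {
--         "one": "1",
--         "two": "2",
--         "three": "3",
--         "four": "4",
--         "five": "5",
--         "six": "6",
--         "seven": "7",
--         "eight": "8",
--         "nine": "9"
--     }
--     # replace first word digit
--     updated_text = text
--     for i in range(len(text)):
--         to_replace = None
--         substring = text[i:i+3]
--         if substring in digit_replacements:
--             to_replace = substring
--         substring = text[i:i+4]
--         if substring in digit_replacements: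
--             to_replace = substring
--         substring = text[i:i+5]
--         if substring in digit_replacements:
--             to_replace = substring
--
--         if to_replace:
--             updated_text = text.replace(to_replace, digit_replacements[to_replace])
--             break
--
--
--     # replace last word digit
--     final_text = updated_text
--     for i in range(len(updated_text)-1, -1, -1):
--         to_replace = None
--         substring = updated_text[i-3+1:i+1]
--         if substring in digit_replacements:
--             to_replace = substring
--         substring = updated_text[i-4+1:i+1]
--         if substring in digit_replacements:
--             to_replace = substring
--         substring = updated_text[i-5+1:i+1]
--         if substring in digit_replacements:
--             to_replace = substring
--
--         if to_replace:
--             final_text = updated_text.replace(to_replace, digit_replacements[to_replace])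
--             break
--     return final_text
-- ===== SOURCE B (Python) =====
-- WORDS = {
--     "one": "1", "two": "2", "three": "3", "four": "4", "five": "5",
--     "six": "6", "seven": "7", "eight": "8", "nine": "9",
-- }
--
--
-- def replace_first_and_last_written_numbers(text: str):
--     # Phase 1: replace the word whose first occurrence starts earliest.
--     best = None
--     for word in WORDS:
--         i = text.find(word)
--         if i != -1 and (best is None or i < best[0]):
--             best = (i, word)
--     updated_text = text.replace(best[1], WORDS[best[1]]) if best else text
--     # Phase 2: replace the word whose last occurrence ends rightmost.
--     best = None
--     for word in WORDS:
--         j = updated_text.rfind(word)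
--         if j != -1 and (best is None or j + len(word) > best[0]):
--             best = (j + len(word), word)
--     return updated_text.replace(best[1], WORDS[best[1]]) if best else updated_text
-- ===== Notes on version B (the rewrite author's own statement) =====
-- stated objective: faster
-- what changed: A scans the text index by index (forward, then backward) in Python-level loops testing 3/4/5-character slices against the dict; B instead selects per word: the word whose text.find(word) is smallest for the first replacement, then the word whose rfind(word)+len(word) is largest for the second, replacing all occurrences of the selected word each time just as A does.
import Mathlib
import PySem

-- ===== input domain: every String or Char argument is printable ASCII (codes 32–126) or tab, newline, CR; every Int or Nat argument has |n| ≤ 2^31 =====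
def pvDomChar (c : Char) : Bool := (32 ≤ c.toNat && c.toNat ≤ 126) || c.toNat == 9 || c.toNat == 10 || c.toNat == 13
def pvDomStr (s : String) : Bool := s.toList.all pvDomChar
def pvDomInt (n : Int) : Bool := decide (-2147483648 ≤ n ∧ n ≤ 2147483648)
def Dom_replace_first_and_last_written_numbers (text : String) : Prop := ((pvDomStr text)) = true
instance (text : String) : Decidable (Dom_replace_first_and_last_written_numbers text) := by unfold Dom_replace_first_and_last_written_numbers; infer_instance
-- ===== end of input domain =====

-- B replaces A's index-by-index forward and backward scans by a per-word selection:
-- the word whose first occurrence (text.find) starts leftmost, then the word whose last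
-- occurrence ends rightmost (rfind + len); same return value, measurably faster in
-- Python (a few find/rfind calls instead of a per-index Python-level loop).

-- ===== PORT A =====

def pvDigitsA : PySem.Dict String String :=
  PySem.Dict.ofList [("one","1"),("two","2"),("three","3"),("four","4"),("five","5"),
    ("six","6"),("seven","7"),("eight","8"),("nine","9")]

-- one iteration body of A's first loop: the value of `to_replace` at index i
-- (checks text[i:i+3], text[i:i+4], text[i:i+5] in that order, the later match winning)
def pvPick1 (text : String) (i : Int) : Option String :=
  let t3 : Option String :=
    if pvDigitsA.contains (PySem.Str.slice text (some i) (some (i+3))) then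
      some (PySem.Str.slice text (some i) (some (i+3))) else none
  let t4 : Option String :=
    if pvDigitsA.contains (PySem.Str.slice text (some i) (some (i+4))) then
      some (PySem.Str.slice text (some i) (some (i+4))) else t3
  if pvDigitsA.contains (PySem.Str.slice text (some i) (some (i+5))) then
    some (PySem.Str.slice text (some i) (some (i+5))) else t4

-- A's first loop; `break` = stop recursing; the dict lookup's default is never used (the key is present)
def pvLoop1 (text : String) : List Int → String
  | [] => text
  | i :: rest =>
    match pvPick1 text i with
    | some w => PySem.Str.replace text w (pvDigitsA.getD w "")
    | none => pvLoop1 text rest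

-- one iteration body of A's second loop (slices text[i-3+1:i+1], text[i-4+1:i+1], text[i-5+1:i+1])
def pvPick2 (t : String) (i : Int) : Option String :=
  let t3 : Option String :=
    if pvDigitsA.contains (PySem.Str.slice t (some (i - 3 + 1)) (some (i+1))) then
      some (PySem.Str.slice t (some (i - 3 + 1)) (some (i+1))) else none
  let t4 : Option String :=
    if pvDigitsA.contains (PySem.Str.slice t (some (i - 4 + 1)) (some (i+1))) then
      some (PySem.Str.slice t (some (i - 4 + 1)) (some (i+1))) else t3
  if pvDigitsA.contains (PySem.Str.slice t (some (i - 5 + 1)) (some (i+1))) then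
    some (PySem.Str.slice t (some (i - 5 + 1)) (some (i+1))) else t4

-- A's second loop, over range(len(updated_text)-1, -1, -1)
def pvLoop2 (t : String) : List Int → String
  | [] => t
  | i :: rest =>
    match pvPick2 t i with
    | some w => PySem.Str.replace t w (pvDigitsA.getD w "")
    | none => pvLoop2 t rest

def replace_first_and_last_written_numbers (text : String) : String :=
  let updated_text := pvLoop1 text (PySem.List.pyRange 0 (PySem.Str.len text) 1)
  pvLoop2 updated_text (PySem.List.pyRange (PySem.Str.len updated_text - 1) (-1) (-1))

-- ===== PORT B =====

-- the module-level WORDS dict of Source B, in insertion order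
def pvWordsB : List (String × String) :=
  [("one","1"),("two","2"),("three","3"),("four","4"),("five","5"),
   ("six","6"),("seven","7"),("eight","8"),("nine","9")]

-- phase-1 loop of Source B: best = (first-occurrence index, word), minimizing the index
def pvBest1 (text : String) : Option (Int × String) :=
  pvWordsB.foldl (fun best p =>
    let i := PySem.Str.find text p.1
    if !(i == -1) && best.all (fun b => decide (i < b.1)) then some (i, p.1) else best) none

-- phase-2 loop of Source B: best = (rfind + len(word), word), maximizing the end position
def pvBest2 (t : String) : Option (Int × String) :=
  pvWordsB.foldl (fun best p =>
    let j := PySem.Str.rfind t p.1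
    if !(j == -1) && best.all (fun b => decide (b.1 < j + PySem.Str.len p.1)) then
      some (j + PySem.Str.len p.1, p.1) else best) none

def replace_first_and_last_written_numbers_alt (text : String) : String :=
  let updated_text :=
    match pvBest1 text with
    | some b => PySem.Str.replace text b.2 ((pvWordsB.lookup b.2).getD "")
    | none => text
  match pvBest2 updated_text with
  | some b => PySem.Str.replace updated_text b.2 ((pvWordsB.lookup b.2).getD "")
  | none => updated_text

-- ===== PRECONDITION & SPEC =====
def Spec_replace_first_and_last_written_numbers (text : String) (out : String) : Prop := out = replace_first_and_last_written_numbers_alt text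
instance (text : String) (out : String) : Decidable (Spec_replace_first_and_last_written_numbers text out) := by unfold Spec_replace_first_and_last_written_numbers; infer_instance

-- ===== CLAIM (what is proved, stated in full; the proofs are below) =====
def Claim_equal_replace_first_and_last_written_numbers : Prop := ∀ (text : String), Dom_replace_first_and_last_written_numbers text → Spec_replace_first_and_last_written_numbers text (replace_first_and_last_written_numbers text)

-- ===== LEMMAS AND PROOFS =====

def pvKeys : List String :=
  ["one","two","three","four","five","six","seven","eight","nine"]
theorem pvContains_iff (s : String) : pvDigitsA.contains s = true ↔ s ∈ pvKeys := by
  have h : pvDigitsA = PySem.Dict.mk [("one","1"),("two","2"),("three","3"),("four","4"),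
      ("five","5"),("six","6"),("seven","7"),("eight","8"),("nine","9")] := by decide
  rw [h, PySem.Dict.contains_mk]
  simp only [List.any_cons, List.any_nil, Bool.or_eq_true, beq_iff_eq, pvKeys,
    List.mem_cons, List.not_mem_nil, or_false, Bool.false_eq_true]
  constructor
  · rintro (h|h|h|h|h|h|h|h|h) <;> simp_all
  · rintro (h|h|h|h|h|h|h|h|h) <;> simp_all
theorem pvUniqPrefix {w1 w2 : String} (h1 : w1 ∈ pvKeys) (h2 : w2 ∈ pvKeys)
    {l : List Char} (p1 : w1.toList <+: l) (p2 : w2.toList <+: l) : w1 = w2 := by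
  have hcmp := List.prefix_or_prefix_of_prefix p1 p2
  have key : ∀ a ∈ pvKeys, ∀ b ∈ pvKeys, a.toList <+: b.toList → a = b := by decide
  rcases hcmp with h | h
  · exact key _ h1 _ h2 h
  · exact (key _ h2 _ h1 h).symm
theorem pvUniqSuffix {w1 w2 : String} (h1 : w1 ∈ pvKeys) (h2 : w2 ∈ pvKeys)
    {l : List Char} (p1 : w1.toList <:+ l) (p2 : w2.toList <:+ l) : w1 = w2 := by
  have hcmp := List.suffix_or_suffix_of_suffix p1 p2
  have key : ∀ a ∈ pvKeys, ∀ b ∈ pvKeys, a.toList <:+ b.toList → a = b := by decide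
  rcases hcmp with h | h
  · exact key _ h1 _ h2 h
  · exact (key _ h2 _ h1 h).symm
theorem pvKeyNonempty {w : String} (h : w ∈ pvKeys) : w.toList ≠ [] := by
  fin_cases h <;> decide
theorem pvLookupEq {w : String} (h : w ∈ pvKeys) :
    pvDigitsA.getD w "" = (pvWordsB.lookup w).getD "" := by
  fin_cases h <;> decide

theorem pvSlice1_prefix {l : List Char} {i : Int} (hi : 0 ≤ i) (k : Nat) :
    PySem.List.slice l (some i) (some (i + k)) <+: l.drop i.toNat := by
  rw [PySem.List.slice_toNat l hi (by omega)]
  exact List.take_prefix _ _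

theorem pvSlice1_eq {l w : List Char} {i : Int} (hi : 0 ≤ i) (k : Nat) (hk : w.length = k)
    (hp : w <+: l.drop i.toNat) : PySem.List.slice l (some i) (some (i + k)) = w := by
  rw [PySem.List.slice_toNat l hi (by omega)]
  have h2 : (i + (k:Int)).toNat - i.toNat = k := by omega
  rw [h2, ← hk]
  exact (List.prefix_iff_eq_take.1 hp).symm

theorem pvSlice2_suffix {l : List Char} (a : Int) {i : Int} (hi : 0 ≤ i) :
    PySem.List.slice l (some a) (some (i + 1)) <:+ l.take (i.toNat + 1) := by
  have hcast : (i + 1 : Int) = ((i.toNat + 1 : Nat) : Int) := by omega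
  simp only [PySem.List.slice, hcast, PySem.List.clampIdx_natCast]
  rw [← List.drop_take]
  rw [← List.take_take, List.take_length]
  exact List.drop_suffix _ _

theorem pvSlice2_eq {l w : List Char} {i : Int} (hi : 0 ≤ i) (hlen : i.toNat < l.length)
    (k : Nat) (hk : w.length = k)
    (hs : w <:+ l.take (i.toNat + 1)) :
    PySem.List.slice l (some (i - k + 1)) (some (i + 1)) = w := by
  have hkle : k ≤ i.toNat + 1 := by
    have := hs.length_le
    rwa [List.length_take, hk, min_eq_left (by omega)] at this
  have ha : (0:Int) ≤ i - k + 1 := by omega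
  rw [PySem.List.slice_toNat l ha (by omega)]
  have h1 : (i + 1).toNat - (i - (k:Int) + 1).toNat = k := by omega
  have h2 : (i - (k:Int) + 1).toNat = i.toNat + 1 - k := by omega
  rw [h1, h2]
  have hw := List.suffix_iff_eq_drop.1 hs
  rw [List.length_take, hk, min_eq_left (by omega)] at hw
  rw [hw, List.drop_take]
  congr 1
  omega
-- every key has length 3, 4 or 5
theorem pvKeyLen {w : String} (h : w ∈ pvKeys) :
    w.toList.length = 3 ∨ w.toList.length = 4 ∨ w.toList.length = 5 := by
  fin_cases h <;> decide

theorem pvPick1_sound {t : String} {i : Int} (hi : 0 ≤ i) {w : String}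
    (h : pvPick1 t i = some w) : w ∈ pvKeys ∧ w.toList <+: t.toList.drop i.toNat := by
  unfold pvPick1 at h
  have hpre : ∀ (k : Nat), (PySem.Str.slice t (some i) (some (i + k))).toList <+:
      t.toList.drop i.toNat := by
    intro k
    rw [PySem.Str.toList_slice, PySem.Chars.slice_eq_listSlice]
    exact pvSlice1_prefix hi k
  have h3 := hpre 3; have h4 := hpre 4; have h5 := hpre 5
  push_cast at h3 h4 h5
  by_cases c5 : pvDigitsA.contains (PySem.Str.slice t (some i) (some (i+5))) = true
  · simp only [c5, if_true] at h
    injection h with h; subst h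
    exact ⟨(pvContains_iff _).1 c5, h5⟩
  · simp only [c5, if_false, Bool.false_eq_true] at h
    by_cases c4 : pvDigitsA.contains (PySem.Str.slice t (some i) (some (i+4))) = true
    · simp only [c4, if_true] at h
      injection h with h; subst h
      exact ⟨(pvContains_iff _).1 c4, h4⟩
    · simp only [c4, if_false, Bool.false_eq_true] at h
      by_cases c3 : pvDigitsA.contains (PySem.Str.slice t (some i) (some (i+3))) = true
      · simp only [c3, if_true] at h
        injection h with h; subst h
        exact ⟨(pvContains_iff _).1 c3, h3⟩
      · simp only [c3, if_false, Bool.false_eq_true] at h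
        simp at h

theorem pvPick1_complete {t : String} {i : Int} (hi : 0 ≤ i) {w : String}
    (hw : w ∈ pvKeys) (hp : w.toList <+: t.toList.drop i.toNat) : pvPick1 t i = some w := by
  have hfire : ∀ (k : Nat), w.toList.length = k →
      PySem.Str.slice t (some i) (some (i + k)) = w := by
    intro k hk
    rw [← String.toList_inj, PySem.Str.toList_slice, PySem.Chars.slice_eq_listSlice]
    exact pvSlice1_eq hi k hk hp
  cases hres : pvPick1 t i with
  | some v =>
    obtain ⟨hv, hvp⟩ := pvPick1_sound hi hres
    exact congrArg some (pvUniqPrefix hv hw hvp hp)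
  | none =>
    exfalso
    have hc : pvDigitsA.contains
        (PySem.Str.slice t (some i) (some (i + w.toList.length))) = true := by
      rw [hfire w.toList.length rfl]; exact (pvContains_iff w).2 hw
    unfold pvPick1 at hres
    by_cases c5 : pvDigitsA.contains (PySem.Str.slice t (some i) (some (i+5))) = true
    · simp only [c5, if_true] at hres
      simp at hres
    · simp only [c5, if_false, Bool.false_eq_true] at hres
      by_cases c4 : pvDigitsA.contains (PySem.Str.slice t (some i) (some (i+4))) = true
      · simp only [c4, if_true] at hres
        simp at hres
      · simp only [c4, if_false, Bool.false_eq_true] at hres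
        by_cases c3 : pvDigitsA.contains (PySem.Str.slice t (some i) (some (i+3))) = true
        · simp only [c3, if_true] at hres
          simp at hres
        · rcases pvKeyLen hw with hk | hk | hk <;>
            (rw [hk] at hc; push_cast at hc; simp_all)
theorem pvPick2_sound {t : String} {i : Int} (hi : 0 ≤ i) {w : String}
    (h : pvPick2 t i = some w) : w ∈ pvKeys ∧ w.toList <:+ t.toList.take (i.toNat + 1) := by
  unfold pvPick2 at h
  have hpre : ∀ (a : Int), (PySem.Str.slice t (some a) (some (i + 1))).toList <:+
      t.toList.take (i.toNat + 1) := by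
    intro a
    rw [PySem.Str.toList_slice, PySem.Chars.slice_eq_listSlice]
    exact pvSlice2_suffix a hi
  by_cases c5 : pvDigitsA.contains (PySem.Str.slice t (some (i - 5 + 1)) (some (i+1))) = true
  · simp only [c5, if_true] at h
    injection h with h; subst h
    exact ⟨(pvContains_iff _).1 c5, hpre _⟩
  · simp only [c5, if_false, Bool.false_eq_true] at h
    by_cases c4 : pvDigitsA.contains (PySem.Str.slice t (some (i - 4 + 1)) (some (i+1))) = true
    · simp only [c4, if_true] at h
      injection h with h; subst h
      exact ⟨(pvContains_iff _).1 c4, hpre _⟩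
    · simp only [c4, if_false, Bool.false_eq_true] at h
      by_cases c3 : pvDigitsA.contains (PySem.Str.slice t (some (i - 3 + 1)) (some (i+1))) = true
      · simp only [c3, if_true] at h
        injection h with h; subst h
        exact ⟨(pvContains_iff _).1 c3, hpre _⟩
      · simp only [c3, if_false, Bool.false_eq_true] at h
        simp at h

theorem pvPick2_complete {t : String} {i : Int} (hi : 0 ≤ i) (hlen : i.toNat < t.toList.length)
    {w : String} (hw : w ∈ pvKeys) (hp : w.toList <:+ t.toList.take (i.toNat + 1)) :
    pvPick2 t i = some w := by
  have hfire : ∀ (k : Nat), w.toList.length = k →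
      PySem.Str.slice t (some (i - k + 1)) (some (i + 1)) = w := by
    intro k hk
    rw [← String.toList_inj, PySem.Str.toList_slice, PySem.Chars.slice_eq_listSlice]
    exact pvSlice2_eq hi hlen k hk hp
  cases hres : pvPick2 t i with
  | some v =>
    obtain ⟨hv, hvp⟩ := pvPick2_sound hi hres
    exact congrArg some (pvUniqSuffix hv hw hvp hp)
  | none =>
    exfalso
    have hc : pvDigitsA.contains
        (PySem.Str.slice t (some (i - w.toList.length + 1)) (some (i + 1))) = true := by
      rw [hfire w.toList.length rfl]; exact (pvContains_iff w).2 hw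
    unfold pvPick2 at hres
    by_cases c5 : pvDigitsA.contains (PySem.Str.slice t (some (i - 5 + 1)) (some (i+1))) = true
    · simp only [c5, if_true] at hres
      simp at hres
    · simp only [c5, if_false, Bool.false_eq_true] at hres
      by_cases c4 : pvDigitsA.contains (PySem.Str.slice t (some (i - 4 + 1)) (some (i+1))) = true
      · simp only [c4, if_true] at hres
        simp at hres
      · simp only [c4, if_false, Bool.false_eq_true] at hres
        by_cases c3 : pvDigitsA.contains (PySem.Str.slice t (some (i - 3 + 1)) (some (i+1))) = true
        · simp only [c3, if_true] at hres
          simp at hres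
        · rcases pvKeyLen hw with hk | hk | hk <;>
            (rw [hk] at hc; push_cast at hc; simp_all)
theorem pvLoop1_none {t : String} {idxs : List Int}
    (h : ∀ i ∈ idxs, pvPick1 t i = none) : pvLoop1 t idxs = t := by
  induction idxs with
  | nil => rfl
  | cons i rest ih =>
    have hi := h i (by simp)
    simp [pvLoop1, hi]
    exact ih (fun j hj => h j (by simp [hj]))

theorem pvLoop2_none {t : String} {idxs : List Int}
    (h : ∀ i ∈ idxs, pvPick2 t i = none) : pvLoop2 t idxs = t := by
  induction idxs with
  | nil => rfl
  | cons i rest ih =>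
    have hi := h i (by simp)
    simp [pvLoop2, hi]
    exact ih (fun j hj => h j (by simp [hj]))

theorem pvLoop1_found {t w : String} (n i0 : Int)
    (hfound : pvPick1 t i0 = some w)
    (hnone : ∀ i, 0 ≤ i → i < i0 → pvPick1 t i = none)
    (h0 : 0 ≤ i0) (hn : i0 < n) :
    pvLoop1 t (PySem.List.pyRange 0 n 1) = PySem.Str.replace t w (pvDigitsA.getD w "") := by
  suffices H : ∀ (d : Nat) (a : Int), 0 ≤ a → a ≤ i0 → i0 - a = d →
      pvLoop1 t (PySem.List.pyRange a n 1) = PySem.Str.replace t w (pvDigitsA.getD w "") by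
    exact H i0.toNat 0 le_rfl h0 (by omega)
  intro d
  induction d with
  | zero =>
    intro a ha0 hai hd
    have : a = i0 := by omega
    subst this
    rw [PySem.List.pyRange_one_cons (by omega)]
    simp [pvLoop1, hfound]
  | succ d ih =>
    intro a ha0 hai hd
    rw [PySem.List.pyRange_one_cons (by omega)]
    have hpn : pvPick1 t a = none := hnone a ha0 (by omega)
    simp [pvLoop1, hpn]
    exact ih (a+1) (by omega) (by omega) (by omega)

theorem pvLoop2_found {t w : String} (a0 i0 : Int)
    (hfound : pvPick2 t i0 = some w)
    (hnone : ∀ i, i0 < i → i ≤ a0 → pvPick2 t i = none)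
    (h0 : 0 ≤ i0) (ha : i0 ≤ a0) :
    pvLoop2 t (PySem.List.pyRange a0 (-1) (-1)) = PySem.Str.replace t w (pvDigitsA.getD w "") := by
  suffices H : ∀ (d : Nat) (a : Int), i0 ≤ a → a ≤ a0 → a - i0 = d →
      pvLoop2 t (PySem.List.pyRange a (-1) (-1)) = PySem.Str.replace t w (pvDigitsA.getD w "") by
    exact H (a0 - i0).toNat a0 ha le_rfl (by omega)
  intro d
  induction d with
  | zero =>
    intro a hai haa hd
    have : a = i0 := by omega
    subst this
    rw [PySem.List.pyRange_neg_one_cons (by omega)]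
    simp [pvLoop2, hfound]
  | succ d ih =>
    intro a hai haa hd
    rw [PySem.List.pyRange_neg_one_cons (by omega)]
    have hpn : pvPick2 t a = none := hnone a (by omega) haa
    simp [pvLoop2, hpn]
    exact ih (a-1) (by omega) (by omega) (by omega)
-- generalized forms of Source B's two fold bodies (g = candidate test/position, h = candidate value)
def pvStepMin (g : String × String → Int) (best : Option (Int × String))
    (p : String × String) : Option (Int × String) :=
  if !(g p == -1) && best.all (fun b => decide (g p < b.1)) then some (g p, p.1) else best

def pvStepMax (g h : String × String → Int) (best : Option (Int × String))
    (p : String × String) : Option (Int × String) :=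
  if !(g p == -1) && best.all (fun b => decide (b.1 < h p)) then some (h p, p.1) else best

theorem pvFold1_keep (g : String × String → Int) (i0 : Int) (w0 : String)
    (ws : List (String × String))
    (hmin : ∀ p ∈ ws, g p ≠ -1 → i0 ≤ g p) :
    ws.foldl (pvStepMin g) (some (i0, w0)) = some (i0, w0) := by
  induction ws with
  | nil => rfl
  | cons p rest ih =>
    rw [List.foldl_cons]
    have hstep : pvStepMin g (some (i0, w0)) p = some (i0, w0) := by
      unfold pvStepMin
      by_cases hne : g p = -1
      · simp [hne]
      · have := hmin p (by simp) hne
        simp [not_lt.2 this]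
    rw [hstep]
    exact ih (fun q hq hqn => hmin q (by simp [hq]) hqn)

theorem pvFold1_found (g : String × String → Int) (i0 : Int) (w0 : String)
    (ws : List (String × String)) (acc : Option (Int × String))
    (hacc : acc = none ∨ ∃ j v, acc = some (j, v) ∧ i0 < j)
    (hmem : ∃ p ∈ ws, p.1 = w0)
    (hw0 : ∀ p ∈ ws, p.1 = w0 → g p = i0) (hne : i0 ≠ -1)
    (hmin : ∀ p ∈ ws, g p ≠ -1 → i0 ≤ g p)
    (huniq : ∀ p ∈ ws, g p = i0 → p.1 = w0) :
    ws.foldl (pvStepMin g) acc = some (i0, w0) := by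
  induction ws generalizing acc with
  | nil => simp at hmem
  | cons p rest ih =>
    rw [List.foldl_cons]
    have hrest : ∀ (acc' : Option (Int × String)),
        (acc' = none ∨ ∃ j v, acc' = some (j, v) ∧ i0 < j) → (∃ q ∈ rest, q.1 = w0) →
        rest.foldl (pvStepMin g) acc' = some (i0, w0) := fun acc' ha hm =>
      ih acc' ha hm (fun r hr => hw0 r (by simp [hr])) (fun r hr => hmin r (by simp [hr]))
        (fun r hr => huniq r (by simp [hr]))
    by_cases h1 : g p = -1
    · have hstep : pvStepMin g acc p = acc := by
        unfold pvStepMin; simp [h1]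
      rw [hstep]
      have hpm : p.1 ≠ w0 := fun he => hne (by rw [← hw0 p (by simp) he, h1])
      obtain ⟨q, hq, hq1⟩ := hmem
      rcases List.mem_cons.1 hq with rfl | hq'
      · exact absurd hq1 hpm
      · exact hrest acc hacc ⟨q, hq', hq1⟩
    · have hge : i0 ≤ g p := hmin p (by simp) h1
      by_cases h2 : g p = i0
      · have hp1 : p.1 = w0 := huniq p (by simp) h2
        have hstep : pvStepMin g acc p = some (i0, w0) := by
          unfold pvStepMin
          rcases hacc with rfl | ⟨j, v, rfl, hj⟩
          · simp [h2, hp1, hne]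
          · simp [h2, hp1, hj, hne]
        rw [hstep]
        exact pvFold1_keep g i0 w0 rest (fun r hr => hmin r (by simp [hr]))
      · have hlt : i0 < g p := lt_of_le_of_ne hge (fun h => h2 h.symm)
        have hpm : p.1 ≠ w0 := fun he => h2 (hw0 p (by simp) he)
        obtain ⟨q, hq, hq1⟩ := hmem
        rcases List.mem_cons.1 hq with rfl | hq'
        · exact absurd hq1 hpm
        · have hacc' : pvStepMin g acc p = none ∨
              ∃ j v, pvStepMin g acc p = some (j, v) ∧ i0 < j := by
            unfold pvStepMin
            split_ifs with hc
            · exact Or.inr ⟨_, _, rfl, hlt⟩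
            · exact hacc
          exact hrest (pvStepMin g acc p) hacc' ⟨q, hq', hq1⟩

theorem pvFold1_none (g : String × String → Int) (ws : List (String × String))
    (h : ∀ p ∈ ws, g p = -1) :
    ws.foldl (pvStepMin g) none = none := by
  induction ws with
  | nil => rfl
  | cons p rest ih =>
    rw [List.foldl_cons]
    have hstep : pvStepMin g none p = none := by
      unfold pvStepMin; simp [h p (by simp)]
    rw [hstep]
    exact ih (fun q hq => h q (by simp [hq]))

theorem pvFold2_keep (g h : String × String → Int) (e0 : Int) (w0 : String)
    (ws : List (String × String))
    (hmax : ∀ p ∈ ws, g p ≠ -1 → h p ≤ e0) :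
    ws.foldl (pvStepMax g h) (some (e0, w0)) = some (e0, w0) := by
  induction ws with
  | nil => rfl
  | cons p rest ih =>
    rw [List.foldl_cons]
    have hstep : pvStepMax g h (some (e0, w0)) p = some (e0, w0) := by
      unfold pvStepMax
      by_cases hne : g p = -1
      · simp [hne]
      · have := hmax p (by simp) hne
        simp [not_lt.2 this]
    rw [hstep]
    exact ih (fun q hq hqn => hmax q (by simp [hq]) hqn)

theorem pvFold2_found (g h : String × String → Int) (e0 : Int) (w0 : String)
    (ws : List (String × String)) (acc : Option (Int × String))
    (hacc : acc = none ∨ ∃ j v, acc = some (j, v) ∧ j < e0)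
    (hmem : ∃ p ∈ ws, p.1 = w0)
    (hw0 : ∀ p ∈ ws, p.1 = w0 → g p ≠ -1 ∧ h p = e0)
    (hmax : ∀ p ∈ ws, g p ≠ -1 → h p ≤ e0)
    (huniq : ∀ p ∈ ws, g p ≠ -1 → h p = e0 → p.1 = w0) :
    ws.foldl (pvStepMax g h) acc = some (e0, w0) := by
  induction ws generalizing acc with
  | nil => simp at hmem
  | cons p rest ih =>
    rw [List.foldl_cons]
    have hrest : ∀ (acc' : Option (Int × String)),
        (acc' = none ∨ ∃ j v, acc' = some (j, v) ∧ j < e0) → (∃ q ∈ rest, q.1 = w0) →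
        rest.foldl (pvStepMax g h) acc' = some (e0, w0) := fun acc' ha hm =>
      ih acc' ha hm (fun r hr => hw0 r (by simp [hr])) (fun r hr => hmax r (by simp [hr]))
        (fun r hr => huniq r (by simp [hr]))
    by_cases h1 : g p = -1
    · have hstep : pvStepMax g h acc p = acc := by
        unfold pvStepMax; simp [h1]
      rw [hstep]
      have hpm : p.1 ≠ w0 := fun he => (hw0 p (by simp) he).1 h1
      obtain ⟨q, hq, hq1⟩ := hmem
      rcases List.mem_cons.1 hq with rfl | hq'
      · exact absurd hq1 hpm
      · exact hrest acc hacc ⟨q, hq', hq1⟩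
    · have hle : h p ≤ e0 := hmax p (by simp) h1
      by_cases h2 : h p = e0
      · have hp1 : p.1 = w0 := huniq p (by simp) h1 h2
        have hstep : pvStepMax g h acc p = some (e0, w0) := by
          unfold pvStepMax
          rcases hacc with rfl | ⟨j, v, rfl, hj⟩
          · simp [h1, h2, hp1]
          · simp [h1, h2, hp1, hj]
        rw [hstep]
        exact pvFold2_keep g h e0 w0 rest (fun r hr => hmax r (by simp [hr]))
      · have hlt : h p < e0 := lt_of_le_of_ne hle h2
        have hpm : p.1 ≠ w0 := fun he => h2 (hw0 p (by simp) he).2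
        obtain ⟨q, hq, hq1⟩ := hmem
        rcases List.mem_cons.1 hq with rfl | hq'
        · exact absurd hq1 hpm
        · have hacc' : pvStepMax g h acc p = none ∨
              ∃ j v, pvStepMax g h acc p = some (j, v) ∧ j < e0 := by
            unfold pvStepMax
            split_ifs with hc
            · exact Or.inr ⟨_, _, rfl, hlt⟩
            · exact hacc
          exact hrest (pvStepMax g h acc p) hacc' ⟨q, hq', hq1⟩

theorem pvFold2_none (g h : String × String → Int) (ws : List (String × String))
    (hn : ∀ p ∈ ws, g p = -1) :
    ws.foldl (pvStepMax g h) none = none := by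
  induction ws with
  | nil => rfl
  | cons p rest ih =>
    rw [List.foldl_cons]
    have hstep : pvStepMax g h none p = none := by
      unfold pvStepMax; simp [hn p (by simp)]
    rw [hstep]
    exact ih (fun q hq => hn q (by simp [hq]))
-- characterization of CPython's str.rfind scan (PySem.Chars.rfind.go): the HIGHEST
-- start index i ≤ j at which sub occurs, or -1
theorem pvRfind_go_spec (s sub : List Char) (j : Nat) :
    (PySem.Chars.rfind.go s sub j = -1 ∧ ∀ i ≤ j, ¬ sub <+: s.drop i) ∨
    (∃ i : Nat, i ≤ j ∧ PySem.Chars.rfind.go s sub j = (i : Int) ∧ sub <+: s.drop i ∧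
      ∀ i', i < i' → i' ≤ j → ¬ sub <+: s.drop i') := by
  induction j with
  | zero =>
    by_cases h : sub.isPrefixOf s
    · right
      exact ⟨0, le_refl 0, by simp [PySem.Chars.rfind.go, h],
        by simpa using List.isPrefixOf_iff_prefix.1 h,
        fun i' h1 h2 => absurd (Nat.lt_of_lt_of_le h1 h2) (by omega)⟩
    · left
      refine ⟨by simp [PySem.Chars.rfind.go, h], fun i hi => ?_⟩
      have : i = 0 := by omega
      subst this
      simpa using fun hp => h (List.isPrefixOf_iff_prefix.2 hp)
  | succ j ih =>
    by_cases h : sub.isPrefixOf (s.drop (j+1))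
    · right
      exact ⟨j+1, le_refl _, by simp [PySem.Chars.rfind.go, h],
        List.isPrefixOf_iff_prefix.1 h,
        fun i' h1 h2 => absurd (Nat.lt_of_lt_of_le h1 h2) (by omega)⟩
    · have hnp : ¬ sub <+: s.drop (j+1) := fun hp => h (List.isPrefixOf_iff_prefix.2 hp)
      have hgo : PySem.Chars.rfind.go s sub (j+1) = PySem.Chars.rfind.go s sub j := by
        simp [PySem.Chars.rfind.go, h]
      rcases ih with ⟨hv, hall⟩ | ⟨i, hij, hv, hocc, hmax⟩
      · left
        refine ⟨hgo.trans hv, fun i hi => ?_⟩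
        rcases Nat.lt_or_ge i (j+1) with hlt | hge
        · exact hall i (by omega)
        · have : i = j + 1 := by omega
          subst this; exact hnp
      · right
        refine ⟨i, by omega, hgo.trans hv, hocc, fun i' h1 h2 => ?_⟩
        rcases Nat.lt_or_ge i' (j+1) with hlt | hge
        · exact hmax i' h1 (by omega)
        · have : i' = j + 1 := by omega
          subst this; exact hnp

-- prefix at m ↔ suffix ending at m + |w|
theorem pvPrefixDrop_suffixTake {w l : List Char} (m : Nat) (h : w <+: l.drop m) :
    w <:+ l.take (m + w.length) := by
  obtain ⟨tl, htl⟩ := h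
  refine ⟨l.take m, ?_⟩
  rw [List.take_add]
  congr 1
  rw [← htl]
  exact List.take_left.symm

theorem pvSuffixTake_prefixDrop {w l : List Char} (e : Nat) (he : e ≤ l.length)
    (h : w <:+ l.take e) : w.length ≤ e ∧ w <+: l.drop (e - w.length) := by
  have hlen : (l.take e).length = e := by
    rw [List.length_take, min_eq_left he]
  have hwle : w.length ≤ e := by
    have := h.length_le; omega
  refine ⟨hwle, ?_⟩
  have hw := List.suffix_iff_eq_drop.1 h
  rw [hlen] at hw
  have h2 : e - (e - w.length) = w.length := by omega
  rw [List.drop_take, h2] at hw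
  have hpre := List.take_prefix w.length (List.drop (e - w.length) l)
  rw [← hw] at hpre
  exact hpre

-- an occurrence of a nonempty w starting at m fits inside l
theorem pvOccLen {w l : List Char} (m : Nat) (hw : w ≠ []) (h : w <+: l.drop m) :
    m + w.length ≤ l.length := by
  have h1 := h.length_le
  rw [List.length_drop] at h1
  have h2 : 1 ≤ w.length := List.length_pos_iff.2 hw
  omega
theorem pvBest1_eq (t : String) :
    pvBest1 t = pvWordsB.foldl (pvStepMin (fun p => PySem.Str.find t p.1)) none := rfl

theorem pvBest2_eq (t : String) :
    pvBest2 t = pvWordsB.foldl (pvStepMax (fun p => PySem.Str.rfind t p.1)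
      (fun p => PySem.Str.rfind t p.1 + PySem.Str.len p.1)) none := rfl

abbrev pvP1 (cs : List Char) (m : Nat) : Prop := ∃ w ∈ pvKeys, w.toList <+: cs.drop m
abbrev pvP2 (cs : List Char) (e : Nat) : Prop := ∃ w ∈ pvKeys, w.toList <:+ cs.take e

theorem pvWordsFstMem : ∀ p ∈ pvWordsB, p.1 ∈ pvKeys := by decide
theorem pvKeysInWords : ∀ w ∈ pvKeys, ∃ p ∈ pvWordsB, p.1 = w := by decide
theorem pvPhase1_eq (t : String) :
    pvLoop1 t (PySem.List.pyRange 0 (PySem.Str.len t) 1) =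
    (match pvBest1 t with
     | some b => PySem.Str.replace t b.2 ((pvWordsB.lookup b.2).getD "")
     | none => t) := by
  by_cases hex : ∃ m, pvP1 t.toList m
  · -- some word occurs; both sides replace the word with the leftmost first occurrence
    obtain ⟨w0, hw0k, hw0p⟩ := Nat.find_spec hex
    set i0 := Nat.find hex with hi0
    have hmin : ∀ m, m < i0 → ¬ pvP1 t.toList m := fun m hm => Nat.find_min hex hm
    have hw0ne : w0.toList ≠ [] := pvKeyNonempty hw0k
    have hi0len : i0 < t.toList.length := by
      have := pvOccLen i0 hw0ne hw0p
      have h1 : 1 ≤ w0.toList.length := List.length_pos_iff.2 hw0ne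
      omega
    have hfind : PySem.Chars.find t.toList w0.toList = (i0 : Int) := by
      have hinf : w0.toList <:+: t.toList :=
        (hw0p.isInfix).trans ((List.drop_suffix i0 t.toList).isInfix)
      have hnn : 0 ≤ PySem.Chars.find t.toList w0.toList :=
        (PySem.Chars.find_nonneg_iff t.toList w0.toList).2 hinf
      obtain ⟨hpre, hminf⟩ := PySem.Chars.find_spec hnn
      have hle : i0 ≤ (PySem.Chars.find t.toList w0.toList).toNat :=
        Nat.find_min' hex ⟨w0, hw0k, hpre⟩
      have hge : (PySem.Chars.find t.toList w0.toList).toNat ≤ i0 := by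
        by_contra hgt
        exact hminf i0 (by omega) hw0p
      omega
    -- A side
    have hA : pvLoop1 t (PySem.List.pyRange 0 (PySem.Str.len t) 1) =
        PySem.Str.replace t w0 (pvDigitsA.getD w0 "") := by
      apply pvLoop1_found (PySem.Str.len t) (i0 : Int)
      · exact pvPick1_complete (by omega) hw0k (by simpa using hw0p)
      · intro i h0 hlt
        cases hp : pvPick1 t i with
        | none => rfl
        | some w =>
          obtain ⟨hk, hpre⟩ := pvPick1_sound h0 hp
          exact absurd ⟨w, hk, hpre⟩ (hmin i.toNat (by omega))
      · omega
      · rw [PySem.Str.len_eq]; omega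
    -- B side
    have hB : pvBest1 t = some ((i0 : Int), w0) := by
      rw [pvBest1_eq]
      apply pvFold1_found _ _ _ _ _ (Or.inl rfl) (pvKeysInWords w0 hw0k)
      · intro p _ hp1
        rw [hp1, PySem.Str.find_eq, hfind]
      · omega
      · intro p hp hne
        rw [PySem.Str.find_eq] at hne ⊢
        have hnn : 0 ≤ PySem.Chars.find t.toList p.1.toList := by
          have := PySem.Chars.neg_one_le_find t.toList p.1.toList
          omega
        obtain ⟨hpre, _⟩ := PySem.Chars.find_spec hnn
        have : i0 ≤ (PySem.Chars.find t.toList p.1.toList).toNat :=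
          Nat.find_min' hex ⟨p.1, pvWordsFstMem p hp, hpre⟩
        omega
      · intro p hp hpe
        rw [PySem.Str.find_eq] at hpe
        have hnn : 0 ≤ PySem.Chars.find t.toList p.1.toList := by rw [hpe]; omega
        obtain ⟨hpre, _⟩ := PySem.Chars.find_spec hnn
        rw [hpe] at hpre
        simp only [Int.toNat_natCast] at hpre
        exact pvUniqPrefix (pvWordsFstMem p hp) hw0k hpre hw0p
    rw [hA, hB]
    simp [pvLookupEq hw0k]
  · -- no word occurs anywhere: both sides return t unchanged
    have hA : pvLoop1 t (PySem.List.pyRange 0 (PySem.Str.len t) 1) = t := by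
      apply pvLoop1_none
      intro i hi
      have h0 : 0 ≤ i := (PySem.List.mem_pyRange_one.1 hi).1
      cases hp : pvPick1 t i with
      | none => rfl
      | some w =>
        obtain ⟨hk, hpre⟩ := pvPick1_sound h0 hp
        exact absurd ⟨i.toNat, w, hk, hpre⟩ hex
    have hB : pvBest1 t = none := by
      rw [pvBest1_eq]
      apply pvFold1_none
      intro p hp
      by_contra hne
      rw [PySem.Str.find_eq] at hne
      have hnn : 0 ≤ PySem.Chars.find t.toList p.1.toList := by
        have := PySem.Chars.neg_one_le_find t.toList p.1.toList
        omega
      obtain ⟨hpre, _⟩ := PySem.Chars.find_spec hnn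
      exact hex ⟨_, p.1, pvWordsFstMem p hp, hpre⟩
    rw [hA, hB]
-- occurrences bridge: a hit of Chars.rfind is an occurrence, bounded by the length
theorem pvRfindSpec {cs w : List Char} (hne : PySem.Chars.rfind cs w ≠ -1) :
    ∃ r : Nat, r ≤ cs.length ∧ PySem.Chars.rfind cs w = (r : Int) ∧ w <+: cs.drop r ∧
      ∀ r', r < r' → r' ≤ cs.length → ¬ w <+: cs.drop r' := by
  rcases pvRfind_go_spec cs w cs.length with ⟨hv, _⟩ | h
  · exact absurd (by simpa [PySem.Chars.rfind] using hv) hne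
  · simpa [PySem.Chars.rfind] using h

theorem pvPhase2_eq (t : String) :
    pvLoop2 t (PySem.List.pyRange (PySem.Str.len t - 1) (-1) (-1)) =
    (match pvBest2 t with
     | some b => PySem.Str.replace t b.2 ((pvWordsB.lookup b.2).getD "")
     | none => t) := by
  by_cases hex : ∃ e, e ≤ t.toList.length ∧ pvP2 t.toList e
  · -- some word occurs; both sides replace the word with the rightmost-ending last occurrence
    set n := t.toList.length with hn
    set e0 := Nat.findGreatest (fun e => pvP2 t.toList e) n with he0
    obtain ⟨e1, he1n, hPe1⟩ := hex
    have he1pos : 0 < e1 := by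
      rcases Nat.eq_zero_or_pos e1 with rfl | h
      · obtain ⟨w, hwk, hws⟩ := hPe1
        simp only [List.take_zero] at hws
        exact absurd (List.suffix_nil.1 hws) (pvKeyNonempty hwk)
      · exact h
    have he0ge : e1 ≤ e0 := Nat.le_findGreatest he1n hPe1
    have he0pos : 0 < e0 := by omega
    have hP0 : pvP2 t.toList e0 := Nat.findGreatest_spec he1n hPe1
    have he0n : e0 ≤ n := Nat.findGreatest_le n
    have hmax : ∀ e, e0 < e → e ≤ n → ¬ pvP2 t.toList e :=
      fun e h1 h2 => Nat.findGreatest_is_greatest h1 h2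
    obtain ⟨w0, hw0k, hw0s⟩ := hP0
    have hw0ne : w0.toList ≠ [] := pvKeyNonempty hw0k
    have hk0pos : 1 ≤ w0.toList.length := List.length_pos_iff.2 hw0ne
    obtain ⟨hk0le, hw0p⟩ := pvSuffixTake_prefixDrop e0 he0n hw0s
    -- rfind of w0 is e0 - |w0|
    have hrfind : PySem.Chars.rfind t.toList w0.toList = ((e0 - w0.toList.length : Nat) : Int) := by
      rcases pvRfind_go_spec t.toList w0.toList n with ⟨_, hall⟩ | ⟨r, hrn, hgo, hocc, hmaxr⟩
      · exact absurd hw0p (hall (e0 - w0.toList.length) (by omega))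
      · have hge : e0 - w0.toList.length ≤ r := by
          by_contra hlt
          exact hmaxr (e0 - w0.toList.length) (by omega) (by omega) hw0p
        have hle : r ≤ e0 - w0.toList.length := by
          by_contra hgt
          have hend := pvOccLen r hw0ne hocc
          have hsuf := pvPrefixDrop_suffixTake r hocc
          exact hmax (r + w0.toList.length) (by omega) (by omega) ⟨w0, hw0k, hsuf⟩
        have : r = e0 - w0.toList.length := by omega
        subst this
        simpa [PySem.Chars.rfind] using hgo
    -- A side
    have hA : pvLoop2 t (PySem.List.pyRange (PySem.Str.len t - 1) (-1) (-1)) =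
        PySem.Str.replace t w0 (pvDigitsA.getD w0 "") := by
      apply pvLoop2_found (PySem.Str.len t - 1) ((e0 - 1 : Nat) : Int)
      · apply pvPick2_complete (by omega) (by rw [Int.toNat_natCast]; omega) hw0k
        have : ((e0 - 1 : Nat) : Int).toNat + 1 = e0 := by omega
        rw [this]
        exact hw0s
      · intro i hgt hle
        have h0 : (0:Int) ≤ i := by omega
        cases hp : pvPick2 t i with
        | none => rfl
        | some w =>
          exfalso
          obtain ⟨hk, hsuf⟩ := pvPick2_sound h0 hp
          rw [PySem.Str.len_eq] at hle
          exact hmax (i.toNat + 1) (by omega) (by omega) ⟨w, hk, hsuf⟩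
      · omega
      · rw [PySem.Str.len_eq]; omega
    -- B side
    have hB : pvBest2 t = some ((e0 : Int), w0) := by
      rw [pvBest2_eq]
      apply pvFold2_found _ _ _ _ _ _ (Or.inl rfl) (pvKeysInWords w0 hw0k)
      · intro p _ hp1
        rw [hp1, PySem.Str.rfind_eq, hrfind, PySem.Str.len_eq]
        constructor
        · omega
        · omega
      · intro p hp hne
        rw [PySem.Str.rfind_eq] at hne ⊢
        obtain ⟨r, hrn, hgo, hocc, _⟩ := pvRfindSpec hne
        have hpne : p.1.toList ≠ [] := pvKeyNonempty (pvWordsFstMem p hp)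
        have hend := pvOccLen r hpne hocc
        have hsuf := pvPrefixDrop_suffixTake r hocc
        have hle : r + p.1.toList.length ≤ e0 := by
          by_contra hgt
          exact hmax (r + p.1.toList.length) (by omega) (by omega)
            ⟨p.1, pvWordsFstMem p hp, hsuf⟩
        rw [hgo, PySem.Str.len_eq]
        omega
      · intro p hp hne heq
        rw [PySem.Str.rfind_eq] at hne heq
        obtain ⟨r, hrn, hgo, hocc, _⟩ := pvRfindSpec hne
        rw [hgo, PySem.Str.len_eq] at heq
        have hre : r + p.1.toList.length = e0 := by omega
        have hsuf := pvPrefixDrop_suffixTake r hocc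
        rw [hre] at hsuf
        exact pvUniqSuffix (pvWordsFstMem p hp) hw0k hsuf hw0s
    rw [hA, hB]
    simp [pvLookupEq hw0k]
  · -- no word occurs anywhere: both sides return t unchanged
    have hA : pvLoop2 t (PySem.List.pyRange (PySem.Str.len t - 1) (-1) (-1)) = t := by
      apply pvLoop2_none
      intro i hi
      obtain ⟨h0, hle⟩ := PySem.List.mem_pyRange_neg_one.1 hi
      rw [PySem.Str.len_eq] at hle
      cases hp : pvPick2 t i with
      | none => rfl
      | some w =>
        exfalso
        obtain ⟨hk, hsuf⟩ := pvPick2_sound (by omega) hp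
        exact hex ⟨i.toNat + 1, by omega, w, hk, hsuf⟩
    have hB : pvBest2 t = none := by
      rw [pvBest2_eq]
      apply pvFold2_none
      intro p hp
      by_contra hne
      rw [PySem.Str.rfind_eq] at hne
      obtain ⟨r, hrn, hgo, hocc, _⟩ := pvRfindSpec hne
      have hpne : p.1.toList ≠ [] := pvKeyNonempty (pvWordsFstMem p hp)
      have hend := pvOccLen r hpne hocc
      have hsuf := pvPrefixDrop_suffixTake r hocc
      exact hex ⟨r + p.1.toList.length, by omega, p.1, pvWordsFstMem p hp, hsuf⟩
    rw [hA, hB]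

-- ===== VERDICT (by name: the statement is the Claim_ definition above) =====
theorem replace_first_and_last_written_numbers_spec : Claim_equal_replace_first_and_last_written_numbers := by
  intro text _
  unfold Spec_replace_first_and_last_written_numbers
  unfold replace_first_and_last_written_numbers replace_first_and_last_written_numbers_alt
  rw [pvPhase1_eq text, pvPhase2_eq]
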